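-- pv_equiv track=rewrite | github.com/Maebara-K7/mahjong-tournament-calculator | cond_lib.py | format_as_intervals
-- ===== SOURCE A (Python) =====
-- def format_as_intervals(ok_pts, all_pts):
--     """将满足条件的点数列表格式化为区间字符串。"""
--     if not ok_pts:
--         return '✕'
--
--     if ok_pts == all_pts:
--         return '〇'
--
--     intervals = []
--     # 为了效率，创建一个从点数到其在 all_pts 中索引的映射
--     # 注意：这要求 all_pts 中的点是可哈希的（元组可以，列表不行）
--     point_to_index = {point: i for i, point in enumerate(all_pts)}
--
--     i = 0
--     while i < len(ok_pts):
--         start_pt = ok_pts[i]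
--
--         # 寻找连续区间的结尾
--         j = i
--         while j + 1 < len(ok_pts):
--             current_pt_idx = point_to_index.get(ok_pts[j])
--             next_pt_idx = point_to_index.get(ok_pts[j + 1])
--
--             # 检查点是否在 all_pts 中，并且是否连续
--             if current_pt_idx is not None and next_pt_idx is not None and next_pt_idx == current_pt_idx + 1:
--                 j += 1
--             else:
--                 # 如果点不在 all_pts 中或不连续，则区间在此处断开
--                 break
--
--         end_pt = ok_pts[j]
--
--         # 检查区间的起止点是否是 all_pts 的“自然”边界
--         is_first_block = (start_pt == all_pts[0])
--         is_last_block = (end_pt == all_pts[-1])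
--
--         # 根据是否为边界来决定格式
--         if is_first_block and start_pt != end_pt:
--             intervals.append(f'<= {end_pt}')
--         elif is_last_block and start_pt != end_pt:
--             intervals.append(f'>= {start_pt}')
--         elif start_pt == end_pt:
--             # 如果区间的起点和终点相同，或者起点已经是理论最大值
--             intervals.append(f"{start_pt}")
--         else:
--             intervals.append(f'{start_pt} ~ {end_pt}')
--
--         i = j + 1
--
--     return " 或 ".join(intervals)
-- ===== SOURCE B (Python) =====
-- def format_as_intervals(ok_pts, all_pts):
--     """将满足条件的点数列表格式化为区间字符串。"""
--     if not ok_pts: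
--         return '✕'
--     if ok_pts == all_pts:
--         return '〇'
--
--     idx = {p: i for i, p in enumerate(all_pts)}
--
--     def adjacent(a, b):
--         ia, ib = idx.get(a), idx.get(b)
--         return ia is not None and ib is not None and ib == ia + 1
--
--     # one pass: build (start, end) blocks, extending the last block while adjacent
--     blocks = []
--     for p in ok_pts:
--         if blocks and adjacent(blocks[-1][1], p):
--             blocks[-1] = (blocks[-1][0], p)
--         else:
--             blocks.append((p, p))
--
--     first, last = all_pts[0], all_pts[-1]
--
--     def render(block):
--         s, e = block
--         if s == first and s != e:
--             return f'<= {e}'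
--         if e == last and s != e:
--             return f'>= {s}'
--         if s == e:
--             return f'{s}'
--         return f'{s} ~ {e}'
--
--     return " 或 ".join(render(b) for b in blocks)
-- ===== Notes on version B (the rewrite author's own statement) =====
-- stated objective: alternative
-- what changed: Replaces A's index-based outer while with a nested inner scan (pvFindJ over positions) by a single fold over the points that extends or starts a (start,end) block, followed by a second pass rendering each block; formatting and guards unchanged.
import Mathlib
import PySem

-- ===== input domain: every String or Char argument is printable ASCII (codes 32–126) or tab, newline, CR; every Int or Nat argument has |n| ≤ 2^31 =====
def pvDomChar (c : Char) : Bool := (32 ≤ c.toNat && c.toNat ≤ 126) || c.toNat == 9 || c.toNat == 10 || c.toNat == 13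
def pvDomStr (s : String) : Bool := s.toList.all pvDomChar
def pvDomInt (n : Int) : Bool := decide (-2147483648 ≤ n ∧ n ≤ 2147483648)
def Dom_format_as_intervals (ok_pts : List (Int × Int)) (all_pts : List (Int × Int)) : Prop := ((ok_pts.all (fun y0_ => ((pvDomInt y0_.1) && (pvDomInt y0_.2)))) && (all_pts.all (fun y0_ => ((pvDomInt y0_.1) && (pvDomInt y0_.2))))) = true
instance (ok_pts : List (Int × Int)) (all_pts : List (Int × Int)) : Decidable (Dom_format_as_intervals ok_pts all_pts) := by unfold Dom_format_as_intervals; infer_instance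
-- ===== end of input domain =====

-- B replaces A's outer-while + inner index scan by one fold building (start,end) blocks
-- plus a second rendering pass; same dict, guards and formatting.  Objective: alternative.

-- str((a, b)) for a Python tuple of two ints
def pvReprPt (p : Int × Int) : String :=
  "(" ++ PySem.Int.toStr p.1 ++ ", " ++ PySem.Int.toStr p.2 ++ ")"

-- {point: i for i, point in enumerate(all_pts)}  (shared: both Pythons build it identically)
def pvIndexMap (all_pts : List (Int × Int)) : PySem.Dict (Int × Int) Int :=
  ((PySem.List.enumerate all_pts).foldl
    (fun (d : PySem.Dict (Int × Int) Int) ip => d.insert ip.2 ip.1)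
    PySem.Dict.empty)

-- ===== PORT A =====
-- inner while: advance j while ok_pts[j], ok_pts[j+1] are both in the map and consecutive
-- (indexing is always in range at call sites, so List.getD's default is never used)
def pvFindJ (ok : List (Int × Int)) (d : PySem.Dict (Int × Int) Int) (j : Nat) : Nat :=
  if j + 1 < ok.length then
    match d.get? (ok.getD j (0, 0)), d.get? (ok.getD (j + 1) (0, 0)) with
    | some ci, some ni => if ni = ci + 1 then pvFindJ ok d (j + 1) else j
    | _, _ => j
  else j
termination_by ok.length - j
decreasing_by omega

theorem pvFindJ_ge (ok : List (Int × Int)) (d : PySem.Dict (Int × Int) Int) (j : Nat) :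
    j ≤ pvFindJ ok d j := by
  fun_induction pvFindJ ok d j <;> omega

-- outer while over i, appending one formatted interval per block
def pvLoopA (ok : List (Int × Int)) (d : PySem.Dict (Int × Int) Int)
    (first last : Int × Int) (i : Nat) (intervals : List String) : List String :=
  if i < ok.length then
    let start_pt := ok.getD i (0, 0)
    let j := pvFindJ ok d i
    let end_pt := ok.getD j (0, 0)
    let str :=
      if start_pt = first ∧ start_pt ≠ end_pt then "<= " ++ pvReprPt end_pt
      else if end_pt = last ∧ start_pt ≠ end_pt then ">= " ++ pvReprPt start_pt
      else if start_pt = end_pt then pvReprPt start_pt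
      else pvReprPt start_pt ++ " ~ " ++ pvReprPt end_pt
    pvLoopA ok d first last (j + 1) (intervals ++ [str])
  else intervals
termination_by ok.length - i
decreasing_by have := pvFindJ_ge ok d i; omega

def format_as_intervals (ok_pts : List (Int × Int)) (all_pts : List (Int × Int)) : String :=
  if ok_pts = [] then "✕"
  else if ok_pts = all_pts then "〇"
  else
    let point_to_index := pvIndexMap all_pts
    -- all_pts[0] / all_pts[-1]: in range under Pre_ (all_pts ≠ []); default never used there
    let first := all_pts.getD 0 (0, 0)
    let last := all_pts.getLastD (0, 0)
    String.intercalate " 或 " (pvLoopA ok_pts point_to_index first last 0 [])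

-- ===== PORT B =====
-- adjacent(a, b): both in the map and indices consecutive
def pvAdj (d : PySem.Dict (Int × Int) Int) (a b : Int × Int) : Bool :=
  match d.get? a, d.get? b with
  | some ia, some ib => ib == ia + 1
  | _, _ => false

-- loop body: extend the last block or start a new one
def pvStepB (d : PySem.Dict (Int × Int) Int)
    (blocks : List ((Int × Int) × (Int × Int))) (p : Int × Int) :
    List ((Int × Int) × (Int × Int)) :=
  match blocks.getLast? with
  | some (s, e) =>
      if pvAdj d e p then blocks.dropLast ++ [(s, p)] else blocks ++ [(p, p)]
  | none => [(p, p)]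

-- render(block)
def pvRender (first last : Int × Int) (b : (Int × Int) × (Int × Int)) : String :=
  if b.1 = first ∧ b.1 ≠ b.2 then "<= " ++ pvReprPt b.2
  else if b.2 = last ∧ b.1 ≠ b.2 then ">= " ++ pvReprPt b.1
  else if b.1 = b.2 then pvReprPt b.1
  else pvReprPt b.1 ++ " ~ " ++ pvReprPt b.2

def format_as_intervals_alt (ok_pts : List (Int × Int)) (all_pts : List (Int × Int)) : String :=
  if ok_pts = [] then "✕"
  else if ok_pts = all_pts then "〇"
  else
    let idx := pvIndexMap all_pts
    let blocks := ok_pts.foldl (pvStepB idx) []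
    let first := all_pts.getD 0 (0, 0)
    let last := all_pts.getLastD (0, 0)
    String.intercalate " 或 " (blocks.map (pvRender first last))

-- ===== PRECONDITION & SPEC =====
-- Pre_ excludes exactly the inputs where Python A raises IndexError (all_pts[0] with
-- ok_pts nonempty, ok_pts ≠ all_pts and all_pts empty); B raises there too.
def Pre_format_as_intervals (ok_pts : List (Int × Int)) (all_pts : List (Int × Int)) : Prop :=
  ok_pts = [] ∨ all_pts ≠ []
instance (ok_pts : List (Int × Int)) (all_pts : List (Int × Int)) : Decidable (Pre_format_as_intervals ok_pts all_pts) := by unfold Pre_format_as_intervals; infer_instance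

def pvWitness_format_as_intervals : (List (Int × Int)) × (List (Int × Int)) :=
  ([(1, 0)], [(1, 0), (2, 0)])

def Spec_format_as_intervals (ok_pts : List (Int × Int)) (all_pts : List (Int × Int)) (out : String) : Prop := out = format_as_intervals_alt ok_pts all_pts
instance (ok_pts : List (Int × Int)) (all_pts : List (Int × Int)) (out : String) : Decidable (Spec_format_as_intervals ok_pts all_pts out) := by unfold Spec_format_as_intervals; infer_instance

-- ===== CLAIM (what is proved, stated in full; the proofs are below) =====
def Claim_equal_format_as_intervals : Prop := ∀ (ok_pts : List (Int × Int)) (all_pts : List (Int × Int)), Dom_format_as_intervals ok_pts all_pts → Pre_format_as_intervals ok_pts all_pts → Spec_format_as_intervals ok_pts all_pts (format_as_intervals ok_pts all_pts)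

-- ===== LEMMAS AND PROOFS =====

-- the common grouping recursion: current block (s, e), remaining points
def pvGrp (d : PySem.Dict (Int × Int) Int) (s e : Int × Int) :
    List (Int × Int) → List ((Int × Int) × (Int × Int))
  | [] => [(s, e)]
  | p :: rest => if pvAdj d e p then pvGrp d s p rest else (s, e) :: pvGrp d p p rest

theorem foldl_pvStepB (d : PySem.Dict (Int × Int) Int) (rest : List (Int × Int)) :
    ∀ (acc : List ((Int × Int) × (Int × Int))) (s e : Int × Int),
      rest.foldl (pvStepB d) (acc ++ [(s, e)]) = acc ++ pvGrp d s e rest := by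
  induction rest with
  | nil => intro acc s e; simp [pvGrp]
  | cons p rest ih =>
      intro acc s e
      simp only [List.foldl_cons, pvGrp]
      have hstep : pvStepB d (acc ++ [(s, e)]) p =
          if pvAdj d e p then acc ++ [(s, p)] else (acc ++ [(s, e)]) ++ [(p, p)] := by
        simp [pvStepB]
      rw [hstep]
      by_cases h : pvAdj d e p
      · simp only [h, if_true, ih]
      · simp only [h, if_false, Bool.false_eq_true]
        rw [show acc ++ [(s, e)] ++ [(p, p)] = (acc ++ [(s, e)]) ++ [(p, p)] from rfl, ih]
        simp

theorem foldl_pvStepB_nil (d : PySem.Dict (Int × Int) Int) (p : Int × Int)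
    (rest : List (Int × Int)) :
    (p :: rest).foldl (pvStepB d) [] = pvGrp d p p rest := by
  have := foldl_pvStepB d rest [] p p
  simpa [pvStepB] using this

theorem pvFindJ_grp (ok : List (Int × Int)) (d : PySem.Dict (Int × Int) Int) :
    ∀ (idx : Nat) (s : Int × Int), idx < ok.length →
      pvGrp d s (ok.getD idx (0, 0)) (ok.drop (idx + 1)) =
        (s, ok.getD (pvFindJ ok d idx) (0, 0)) ::
          (if pvFindJ ok d idx + 1 < ok.length then
             pvGrp d (ok.getD (pvFindJ ok d idx + 1) (0, 0))
               (ok.getD (pvFindJ ok d idx + 1) (0, 0))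
               (ok.drop (pvFindJ ok d idx + 2))
           else []) := by
  intro idx s h
  fun_induction pvFindJ ok d idx generalizing s with
  | case1 j h1 ci hc hn ih =>
      have hdrop : ok.drop (j + 1) = ok.getD (j + 1) (0, 0) :: ok.drop (j + 2) := by
        rw [List.getD_eq_getElem ok (0,0) h1, List.drop_eq_getElem_cons h1]
      rw [hdrop]
      have hadj : pvAdj d (ok.getD j (0, 0)) (ok.getD (j + 1) (0, 0)) = true := by
        simp only [pvAdj, hc, hn]
        simp
      simp only [pvGrp, hadj, if_true]
      exact ih s h1
  | case2 j h1 ci ni hn hc hne =>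
      have hdrop : ok.drop (j + 1) = ok.getD (j + 1) (0, 0) :: ok.drop (j + 2) := by
        rw [List.getD_eq_getElem ok (0,0) h1, List.drop_eq_getElem_cons h1]
      rw [hdrop]
      have hadj : pvAdj d (ok.getD j (0, 0)) (ok.getD (j + 1) (0, 0)) = false := by
        simp only [pvAdj, hc, hn]
        simpa using hne
      simp only [pvGrp, hadj, Bool.false_eq_true, if_false, h1, if_true]
  | case3 j h1 hfalse =>
      have hdrop : ok.drop (j + 1) = ok.getD (j + 1) (0, 0) :: ok.drop (j + 2) := by
        rw [List.getD_eq_getElem ok (0,0) h1, List.drop_eq_getElem_cons h1]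
      rw [hdrop]
      have hadj : pvAdj d (ok.getD j (0, 0)) (ok.getD (j + 1) (0, 0)) = false := by
        cases hx : d.get? (ok.getD j (0, 0)) with
        | none =>
          cases hy : d.get? (ok.getD (j + 1) (0, 0)) <;> simp only [pvAdj, hx, hy]
        | some ci =>
          cases hy : d.get? (ok.getD (j + 1) (0, 0)) with
          | none => simp only [pvAdj, hx, hy]
          | some ni => exact (hfalse ci ni hx hy).elim
      simp only [pvGrp, hadj, Bool.false_eq_true, if_false, h1, if_true]
  | case4 j h1 =>
      have hdrop : ok.drop (j + 1) = [] := List.drop_of_length_le (by omega)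
      rw [hdrop]
      simp only [pvGrp, h1, if_false]

theorem pvLoopA_grp (ok : List (Int × Int)) (d : PySem.Dict (Int × Int) Int)
    (first last : Int × Int) :
    ∀ (n i : Nat) (acc : List String), ok.length - i ≤ n →
      pvLoopA ok d first last i acc =
        acc ++ (if i < ok.length then
          (pvGrp d (ok.getD i (0, 0)) (ok.getD i (0, 0)) (ok.drop (i + 1))).map
            (pvRender first last)
        else []) := by
  intro n
  induction n with
  | zero =>
      intro i acc h
      have : ¬ i < ok.length := by omega
      rw [pvLoopA]
      simp [this]
  | succ n ih =>
      intro i acc h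
      by_cases hi : i < ok.length
      · rw [pvLoopA]
        simp only [hi, if_true]
        have hj := pvFindJ_ge ok d i
        have hrec := ih (pvFindJ ok d i + 1) (acc ++
          [pvRender first last (ok.getD i (0, 0), ok.getD (pvFindJ ok d i) (0, 0))])
          (by omega)
        have hgrp := pvFindJ_grp ok d i (ok.getD i (0, 0)) hi
        rw [hgrp]
        by_cases hjl : pvFindJ ok d i + 1 < ok.length
        · simp only [hjl, if_true] at hrec ⊢
          simp only [pvRender] at hrec
          rw [hrec]
          simp [pvRender, List.append_assoc]
        · simp only [hjl, if_false] at hrec ⊢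
          simp only [pvRender] at hrec
          rw [hrec]
          simp [pvRender]
      · rw [pvLoopA]
        simp [hi]

-- ===== VERDICT (by name: the statement is the Claim_ definition above) =====
theorem format_as_intervals_spec : Claim_equal_format_as_intervals := by
  intro ok_pts all_pts _ _
  unfold Spec_format_as_intervals format_as_intervals format_as_intervals_alt
  by_cases h0 : ok_pts = []
  · simp [h0]
  · simp only [h0, if_false]
    by_cases h1 : ok_pts = all_pts
    · simp [h1]
    · simp only [h1, if_false]
      obtain ⟨p, rest, rfl⟩ : ∃ p rest, ok_pts = p :: rest := by
        cases ok_pts with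
        | nil => exact absurd rfl h0
        | cons p rest => exact ⟨p, rest, rfl⟩
      rw [foldl_pvStepB_nil]
      have := pvLoopA_grp (p :: rest) (pvIndexMap all_pts)
        (all_pts.getD 0 (0, 0)) (all_pts.getLastD (0, 0))
        (p :: rest).length 0 [] (by omega)
      rw [this]
      simp
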